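-- pv_equiv track=rewrite | github.com/kevin-ch-day/ScytaleDroid | scytaledroid/DeviceAnalysis/package_inventory.py | _parse_package_listing
-- ===== SOURCE A (Python) =====
-- def _parse_package_listing(output: str) -> list[tuple[str, str | None, str | None]]:
--     packages: list[tuple[str, str | None, str | None]] = []
--     for raw_line in output.splitlines():
--         line = raw_line.strip()
--         if not line.startswith("package:"):
--             continue
--
--         package_name: str | None = None
--         version_code: str | None = None
--         version_name: str | None = None
--
--         for token in line.split():
--             if token.startswith("package:"):
--                 package_name = token.split(":", 1)[1].strip()
--                 # pm list packages --show-version* can include path=package; keep only the package id.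
--                 if "=" in package_name:
--                     package_name = package_name.rsplit("=", 1)[-1].strip()
--             elif token.startswith("versionCode:"):
--                 version_code = token.split(":", 1)[1].strip()
--             elif token.startswith("versionName:"):
--                 version_name = token.split(":", 1)[1].strip()
--
--         if package_name:
--             packages.append((package_name, version_code or None, version_name or None))
--
--     return packages
-- ===== SOURCE B (Python) =====
-- def _parse_package_listing(output: str) -> list[tuple[str, str | None, str | None]]:
--     packages: list[tuple[str, str | None, str | None]] = []
--     for raw_line in output.splitlines():
--         line = raw_line.strip()
--         if not line.startswith("package:"):
--             continue
--
--         fields: dict[str, str] = {}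
--         for token in line.split():
--             if ":" in token:
--                 key, rest = token.split(":", 1)
--                 fields[key] = rest.strip()
--
--         package_name = fields.get("package")
--         if package_name is not None and "=" in package_name:
--             package_name = package_name.rsplit("=", 1)[-1].strip()
--
--         if package_name:
--             packages.append(
--                 (package_name, fields.get("versionCode") or None, fields.get("versionName") or None)
--             )
--     return packages
-- ===== Notes on version B (the rewrite author's own statement) =====
-- stated objective: alternative
-- what changed: Replaces A's per-token elif chain over three mutable variables with a single generic pass that builds a prefix-to-value dict (later tokens overwrite earlier ones, preserving last-occurrence-wins) followed by three lookups after the token loop.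
import Mathlib
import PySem

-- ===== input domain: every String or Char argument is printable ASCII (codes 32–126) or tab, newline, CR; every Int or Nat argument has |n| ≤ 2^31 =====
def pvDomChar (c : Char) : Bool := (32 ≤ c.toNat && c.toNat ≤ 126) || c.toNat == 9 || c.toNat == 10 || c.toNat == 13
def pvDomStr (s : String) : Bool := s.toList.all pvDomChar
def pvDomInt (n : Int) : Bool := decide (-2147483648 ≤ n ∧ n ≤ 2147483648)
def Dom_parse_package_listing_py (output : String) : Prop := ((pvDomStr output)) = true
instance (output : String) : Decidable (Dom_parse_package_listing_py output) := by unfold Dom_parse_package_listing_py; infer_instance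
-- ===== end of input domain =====

-- B replaces A's per-token elif chain over three mutable variables by one prefix→value dict built
-- with last-wins overwrites and three lookups afterwards (objective: alternative decomposition).

-- shared hand-port of s.rsplit("=", 1)[-1]: exactly the suffix of s after its last '='
-- (and s itself when s has no '='), which is what Python returns for every s.
def pvRsplitLastEq (s : String) : String :=
  String.ofList ((s.toList.reverse.takeWhile (fun c => c ≠ '=')).reverse)

-- shared port of Python's `x or None` for x : Optional[str]
def pvOrNone (o : Option String) : Option String :=
  match o with
  | some s => if s = "" then none else some s
  | none => none

-- ===== PORT A =====
-- one token of A's inner loop (the elif chain over (package_name, version_code, version_name));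
-- `token.split(":", 1)[1]` is ported with `.getD 1 ""`: the index exists whenever the guarding
-- startswith succeeded (the token then contains ':'), so the default is never used.
def pvStepA (st : Option String × Option String × Option String) (token : String) :
    Option String × Option String × Option String :=
  if PySem.Str.startswith token "package:" then
    let pn := PySem.Str.strip (((PySem.Str.splitMax? token ":" 1).getD []).getD 1 "")
    let pn := if PySem.Str.isIn "=" pn then PySem.Str.strip (pvRsplitLastEq pn) else pn
    (some pn, st.2.1, st.2.2)
  else if PySem.Str.startswith token "versionCode:" then
    (st.1, some (PySem.Str.strip (((PySem.Str.splitMax? token ":" 1).getD []).getD 1 "")), st.2.2)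
  else if PySem.Str.startswith token "versionName:" then
    (st.1, st.2.1, some (PySem.Str.strip (((PySem.Str.splitMax? token ":" 1).getD []).getD 1 "")))
  else st

-- one line of A's outer loop
def pvLineA (acc : List (String × Option String × Option String)) (raw_line : String) :
    List (String × Option String × Option String) :=
  let line := PySem.Str.strip raw_line
  if PySem.Str.startswith line "package:" then
    let st := (PySem.Str.split₀ line).foldl pvStepA (none, none, none)
    match st.1 with
    | some pn => if pn = "" then acc else acc ++ [(pn, pvOrNone st.2.1, pvOrNone st.2.2)]
    | none => acc
  else acc

def parse_package_listing_py (output : String) : List (String × Option String × Option String) :=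
  (PySem.Str.splitlines output).foldl pvLineA []

-- ===== PORT B =====
-- one token of B's inner loop: `key, rest = token.split(":", 1)` (guarded by ':' in token, so the
-- split has two parts and the `.getD` defaults are never used), then fields[key] = rest.strip()
def pvStepB (d : PySem.Dict String String) (token : String) : PySem.Dict String String :=
  if PySem.Str.isIn ":" token then
    let parts := (PySem.Str.splitMax? token ":" 1).getD []
    d.insert (parts.getD 0 "") (PySem.Str.strip (parts.getD 1 ""))
  else d

-- one line of B's outer loop
def pvLineB (acc : List (String × Option String × Option String)) (raw_line : String) :
    List (String × Option String × Option String) :=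
  let line := PySem.Str.strip raw_line
  if PySem.Str.startswith line "package:" then
    let fields := (PySem.Str.split₀ line).foldl pvStepB PySem.Dict.empty
    let pn :=
      match fields.get? "package" with
      | some v => some (if PySem.Str.isIn "=" v then PySem.Str.strip (pvRsplitLastEq v) else v)
      | none => none
    match pn with
    | some p =>
        if p = "" then acc
        else acc ++ [(p, pvOrNone (fields.get? "versionCode"), pvOrNone (fields.get? "versionName"))]
    | none => acc
  else acc

def parse_package_listing_py_alt (output : String) : List (String × Option String × Option String) :=
  (PySem.Str.splitlines output).foldl pvLineB []

-- ===== PRECONDITION & SPEC =====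
def Spec_parse_package_listing_py (output : String) (out : List (String × Option String × Option String)) : Prop := out = parse_package_listing_py_alt output
instance (output : String) (out : List (String × Option String × Option String)) : Decidable (Spec_parse_package_listing_py output out) := by unfold Spec_parse_package_listing_py; infer_instance

-- ===== CLAIM (what is proved, stated in full; the proofs are below) =====
def Claim_equal_parse_package_listing_py : Prop := ∀ (output : String), Dom_parse_package_listing_py output → Spec_parse_package_listing_py output (parse_package_listing_py output)

-- ===== LEMMAS AND PROOFS =====

-- key/value of a token as B's split(":", 1) computes them, and the shared '=' post-processing
def pvKeyOf (t : String) : String := ((PySem.Str.splitMax? t ":" 1).getD []).getD 0 ""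
def pvVal (t : String) : String :=
  PySem.Str.strip (((PySem.Str.splitMax? t ":" 1).getD []).getD 1 "")
def pvProcEq (v : String) : String :=
  if PySem.Str.isIn "=" v then PySem.Str.strip (pvRsplitLastEq v) else v

theorem pv_go_zero (fuel : Nat) (l cur : List Char) (acc : List (List Char)) :
    PySem.Chars.splitOnMax.go [':'] (fuel + 1) 0 l cur acc = ((cur.reverse ++ l) :: acc).reverse := by
  cases l <;> simp [PySem.Chars.splitOnMax.go]

theorem pv_go_one (fuel : Nat) : ∀ (cs cur : List Char) (acc : List (List Char)), cs.length ≤ fuel →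
    PySem.Chars.splitOnMax.go [':'] (fuel + 1) 1 cs cur acc =
      acc.reverse ++ (if ':' ∈ cs then
        [cur.reverse ++ cs.takeWhile (· ≠ ':'), (cs.dropWhile (· ≠ ':')).tail]
      else [cur.reverse ++ cs]) := by
  induction fuel with
  | zero =>
    intro cs cur acc h
    have : cs = [] := List.eq_nil_of_length_eq_zero (Nat.le_zero.mp h)
    subst this
    simp [PySem.Chars.splitOnMax.go]
  | succ fuel ih =>
    intro cs cur acc h
    cases cs with
    | nil => simp [PySem.Chars.splitOnMax.go]
    | cons c rest =>
      by_cases hc : c = ':'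
      · subst hc
        simp only [PySem.Chars.splitOnMax.go]
        simp [pv_go_zero, List.takeWhile_cons, List.dropWhile_cons]
      · have hlen : rest.length ≤ fuel := by simpa using h
        simp only [PySem.Chars.splitOnMax.go]
        rw [if_neg (by norm_num), if_neg (by simp [hc, Ne.symm hc])]
        rw [ih rest (c :: cur) acc hlen]
        simp [List.takeWhile_cons, List.dropWhile_cons, hc, Ne.symm hc]

theorem pv_splitOnMax_one (cs : List Char) :
    PySem.Chars.splitOnMax cs [':'] 1 =
      if ':' ∈ cs then [cs.takeWhile (· ≠ ':'), (cs.dropWhile (· ≠ ':')).tail] else [cs] := by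
  show PySem.Chars.splitOnMax cs [':'] 1 = _
  rw [PySem.Chars.splitOnMax]
  rw [if_neg (by norm_num)]
  have : (1 : Int).toNat = 1 := rfl
  rw [this, pv_go_one (cs.length) cs [] [] (le_refl _)]
  simp

theorem pv_singleton_infix (c : Char) (l : List Char) : [c] <:+: l ↔ c ∈ l := by
  constructor
  · rintro ⟨s, t, rfl⟩; simp
  · intro h
    obtain ⟨s, t, rfl⟩ := List.append_of_mem h
    exact ⟨s, t, by simp⟩

theorem pv_prefix_iff (cs key : List Char) (hk : ∀ c ∈ key, c ≠ ':') :
    key ++ ':' :: [] <+: cs ↔ ':' ∈ cs ∧ cs.takeWhile (· ≠ ':') = key := by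
  constructor
  · rintro ⟨rest, rfl⟩
    constructor
    · simp
    · induction key with
      | nil => simp
      | cons k key ihk =>
        have hkk : k ≠ ':' := hk k (by simp)
        simp only [List.cons_append, List.takeWhile_cons, decide_eq_true_eq]
        rw [if_pos hkk]
        rw [ihk (fun c hcm => hk c (by simp [hcm]))]
  · rintro ⟨hmem, htake⟩
    have hsplit := List.takeWhile_append_dropWhile (p := fun c => decide (c ≠ ':')) (l := cs)
    have hdw : cs.dropWhile (fun c => decide (c ≠ ':')) ≠ [] := by
      intro hnil
      rw [← hsplit, hnil] at hmem
      simp at hmem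
      have := List.mem_takeWhile_imp hmem
      simp at this
    obtain ⟨a, t, hat⟩ := List.exists_cons_of_ne_nil hdw
    have ha : a = ':' := by
      have hh := List.head_dropWhile_not (fun c => decide (c ≠ ':')) hdw
      have : (List.dropWhile (fun c => decide (c ≠ ':')) cs).head hdw = a := by
        simp only [hat, List.head_cons]
      rw [this] at hh
      simpa using hh
    refine ⟨t, ?_⟩
    conv_rhs => rw [← hsplit, htake, hat, ha]
    simp
theorem pv_bridge (t k : String) (hk : ∀ c ∈ k.toList, c ≠ ':') :
    (PySem.Str.startswith t (k ++ ":") = true) ↔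
      (PySem.Str.isIn ":" t = true ∧ pvKeyOf t = k) := by
  have hisin : PySem.Str.isIn ":" t = true ↔ ':' ∈ t.toList := by
    rw [PySem.Str.isIn_iff_infix]
    exact pv_singleton_infix ':' t.toList
  have htl : (k ++ ":").toList = k.toList ++ ':' :: [] := by simp
  have hsw : PySem.Str.startswith t (k ++ ":") = true ↔ k.toList ++ ':' :: [] <+: t.toList := by
    rw [show PySem.Str.startswith t (k ++ ":") = PySem.Chars.startswith t.toList (k ++ ":").toList from by simp [PySem.Str.startswith]]
    rw [htl]
    exact PySem.Chars.startswith_iff _ _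
  rw [hsw, hisin, pv_prefix_iff t.toList k.toList hk]
  have hkey : ':' ∈ t.toList → (pvKeyOf t = k ↔ t.toList.takeWhile (· ≠ ':') = k.toList) := by
    intro hm
    unfold pvKeyOf
    rw [show PySem.Str.splitMax? t ":" 1 = some ((PySem.Chars.splitOnMax t.toList [':'] 1).map String.ofList) from by
      simp [PySem.Str.splitMax?, PySem.Chars.splitMax?]]
    rw [pv_splitOnMax_one, if_pos hm]
    simp only [Option.getD_some, List.map_cons, List.getD_cons_zero]
    constructor
    · intro h; rw [← h]; simp
    · intro h; rw [h]; simp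
  constructor
  · rintro ⟨hm, ht⟩; exact ⟨hm, (hkey hm).mpr ht⟩
  · rintro ⟨hm, ht⟩; exact ⟨hm, (hkey hm).mp ht⟩

theorem pv_sw_excl (t a b : String) (hab : ¬ (a.toList <+: b.toList))
    (hlen : a.toList.length ≤ b.toList.length)
    (ha : PySem.Str.startswith t a = true) : PySem.Str.startswith t b = false := by
  by_contra hb
  rw [Bool.not_eq_false] at hb
  rw [show PySem.Str.startswith t a = PySem.Chars.startswith t.toList a.toList from by simp [PySem.Str.startswith], PySem.Chars.startswith_iff] at ha
  rw [show PySem.Str.startswith t b = PySem.Chars.startswith t.toList b.toList from by simp [PySem.Str.startswith], PySem.Chars.startswith_iff] at hb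
  exact hab (List.prefix_of_prefix_length_le ha hb hlen)

theorem pv_foldA1 (ts : List String) (st : Option String × Option String × Option String) :
    (ts.foldl pvStepA st).1 =
      ts.foldl (fun o t => if PySem.Str.startswith t "package:" then some (pvProcEq (pvVal t)) else o) st.1 := by
  induction ts generalizing st with
  | nil => rfl
  | cons t ts ih =>
    simp only [List.foldl_cons]
    rw [ih]
    congr 1
    unfold pvStepA pvProcEq pvVal
    by_cases h1 : PySem.Str.startswith t "package:" = true
    · rw [if_pos h1, if_pos h1]
    · rw [if_neg h1, if_neg h1]
      split_ifs <;> rfl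

theorem pv_foldA2 (ts : List String) (st : Option String × Option String × Option String) :
    (ts.foldl pvStepA st).2.1 =
      ts.foldl (fun o t => if PySem.Str.startswith t "versionCode:" then some (pvVal t) else o) st.2.1 := by
  induction ts generalizing st with
  | nil => rfl
  | cons t ts ih =>
    simp only [List.foldl_cons]
    rw [ih]
    congr 1
    unfold pvStepA pvVal
    by_cases h1 : PySem.Str.startswith t "package:" = true
    · rw [if_pos h1]
      rw [if_neg (by rw [pv_sw_excl t "package:" "versionCode:" (by decide) (by decide) h1]; exact Bool.false_ne_true)]
    · rw [if_neg h1]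
      split_ifs <;> rfl

theorem pv_foldA3 (ts : List String) (st : Option String × Option String × Option String) :
    (ts.foldl pvStepA st).2.2 =
      ts.foldl (fun o t => if PySem.Str.startswith t "versionName:" then some (pvVal t) else o) st.2.2 := by
  induction ts generalizing st with
  | nil => rfl
  | cons t ts ih =>
    simp only [List.foldl_cons]
    rw [ih]
    congr 1
    unfold pvStepA pvVal
    by_cases h1 : PySem.Str.startswith t "package:" = true
    · rw [if_pos h1]
      rw [if_neg (by rw [pv_sw_excl t "package:" "versionName:" (by decide) (by decide) h1]; exact Bool.false_ne_true)]
    · rw [if_neg h1]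
      by_cases h2 : PySem.Str.startswith t "versionCode:" = true
      · rw [if_pos h2]
        rw [if_neg (by rw [pv_sw_excl t "versionCode:" "versionName:" (by decide) (by decide) h2]; exact Bool.false_ne_true)]
      · rw [if_neg h2]
        split_ifs <;> rfl

theorem pv_foldB (ts : List String) (d : PySem.Dict String String) (k : String) :
    (ts.foldl pvStepB d).get? k =
      ts.foldl (fun o t => if PySem.Str.isIn ":" t = true ∧ pvKeyOf t = k then some (pvVal t) else o) (d.get? k) := by
  induction ts generalizing d with
  | nil => rfl
  | cons t ts ih =>
    simp only [List.foldl_cons]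
    rw [ih]
    congr 1
    unfold pvStepB pvKeyOf pvVal
    by_cases h1 : PySem.Str.isIn ":" t = true
    · rw [if_pos h1, PySem.Dict.get?_insert]
      by_cases h2 : ((PySem.Str.splitMax? t ":" 1).getD []).getD 0 "" = k
      · rw [if_pos h2.symm, if_pos ⟨h1, h2⟩]
      · rw [if_neg (fun hh => h2 hh.symm), if_neg (fun hh => h2 hh.2)]
    · rw [if_neg h1, if_neg (fun hh => h1 hh.1)]

theorem pv_fold_map (c : String → Prop) [DecidablePred c] (f v : String → String) :
    ∀ (ts : List String) (o : Option String),
    ts.foldl (fun o t => if c t then some (f (v t)) else o) (o.map f) =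
      (ts.foldl (fun o t => if c t then some (v t) else o) o).map f := by
  intro ts
  induction ts with
  | nil => intro o; rfl
  | cons t ts ih =>
    intro o
    simp only [List.foldl_cons]
    by_cases h : c t
    · rw [if_pos h, if_pos h, show (some (f (v t))) = (some (v t)).map f from rfl, ih]
    · rw [if_neg h, if_neg h, ih]

theorem pv_foldl_ext {α β : Type} (f g : β → α → β) (h : ∀ b a, f b a = g b a)
    (i : β) (l : List α) : l.foldl f i = l.foldl g i := by
  rw [show f = g from funext fun b => funext fun a => h b a]

set_option maxRecDepth 8192 in
theorem pv_line_eq : pvLineA = pvLineB := by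
  funext acc raw
  unfold pvLineA pvLineB
  by_cases hsw : PySem.Str.startswith (PySem.Str.strip raw) "package:" = true
  · rw [if_pos hsw, if_pos hsw]
    have hbr : ∀ (k : String), (∀ c ∈ k.toList, c ≠ ':') → ∀ (t : String),
        (PySem.Str.startswith t (k ++ ":") = true) ↔ (PySem.Str.isIn ":" t = true ∧ pvKeyOf t = k) :=
      fun k hk t => pv_bridge t k hk
    have hget : ∀ (k : String),
        ((PySem.Str.split₀ (PySem.Str.strip raw)).foldl pvStepB PySem.Dict.empty).get? k =
        (PySem.Str.split₀ (PySem.Str.strip raw)).foldl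
          (fun o t => if PySem.Str.isIn ":" t = true ∧ pvKeyOf t = k then some (pvVal t) else o) none := by
      intro k
      rw [pv_foldB]
      simp
    -- package component
    have h1 : ((PySem.Str.split₀ (PySem.Str.strip raw)).foldl pvStepA (none, none, none)).1 =
        (((PySem.Str.split₀ (PySem.Str.strip raw)).foldl pvStepB PySem.Dict.empty).get? "package").map pvProcEq := by
      rw [pv_foldA1, hget]
      have : ∀ (o : Option String) (t : String),
          (if PySem.Str.startswith t "package:" then some (pvProcEq (pvVal t)) else o) =
          (if PySem.Str.isIn ":" t = true ∧ pvKeyOf t = "package" then some (pvProcEq (pvVal t)) else o) := by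
        intro o t
        exact if_congr (by rw [show ("package:" : String) = "package" ++ ":" from rfl]; exact hbr "package" (by simp) t) rfl rfl
      calc (PySem.Str.split₀ (PySem.Str.strip raw)).foldl
              (fun o t => if PySem.Str.startswith t "package:" then some (pvProcEq (pvVal t)) else o) none
          = (PySem.Str.split₀ (PySem.Str.strip raw)).foldl
              (fun o t => if PySem.Str.isIn ":" t = true ∧ pvKeyOf t = "package" then some (pvProcEq (pvVal t)) else o) ((none : Option String).map pvProcEq) := by
            exact pv_foldl_ext _ _ this none _
        _ = _ := pv_fold_map _ pvProcEq pvVal _ none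
    have h2 : ((PySem.Str.split₀ (PySem.Str.strip raw)).foldl pvStepA (none, none, none)).2.1 =
        ((PySem.Str.split₀ (PySem.Str.strip raw)).foldl pvStepB PySem.Dict.empty).get? "versionCode" := by
      rw [pv_foldA2, hget]
      exact pv_foldl_ext _ _ (fun o t => if_congr (by rw [show ("versionCode:" : String) = "versionCode" ++ ":" from rfl]; exact hbr "versionCode" (by simp) t) rfl rfl) none _
    have h3 : ((PySem.Str.split₀ (PySem.Str.strip raw)).foldl pvStepA (none, none, none)).2.2 =
        ((PySem.Str.split₀ (PySem.Str.strip raw)).foldl pvStepB PySem.Dict.empty).get? "versionName" := by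
      rw [pv_foldA3, hget]
      exact pv_foldl_ext _ _ (fun o t => if_congr (by rw [show ("versionName:" : String) = "versionName" ++ ":" from rfl]; exact hbr "versionName" (by simp) t) rfl rfl) none _
    dsimp only
    rw [h1, h2, h3]
    cases ((PySem.Str.split₀ (PySem.Str.strip raw)).foldl pvStepB PySem.Dict.empty).get? "package" with
    | none => rfl
    | some v => rfl
  · rw [if_neg hsw, if_neg hsw]

-- ===== VERDICT (by name: the statement is the Claim_ definition above) =====
theorem parse_package_listing_py_spec : Claim_equal_parse_package_listing_py := by
  intro output _
  unfold Spec_parse_package_listing_py parse_package_listing_py parse_package_listing_py_alt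
  rw [pv_line_eq]
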